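-- pv_equiv track=rewrite | github.com/timpark0807/self-taught-swe | Algorithms/Leetcode/565 - Array Nesting.py | dfsTheSize
-- ===== SOURCE A (Python) =====
-- def dfsTheSize(start, graph, seen):
--     stack = [start]
--     seen.add(start)
--     size = 0
--     while stack:
--         node = stack.pop()
--         size += 1
--         for neighbor in graph[node]:
--             if neighbor not in seen:
--                 seen.add(neighbor)
--                 stack.append(neighbor)
--     return size
-- ===== SOURCE B (Python) =====
-- def dfsTheSize(start, graph, seen):
--     # Semi-naive fixed-point closure over whole sets: repeatedly take the set of
--     # all neighbors of the current level, subtract `seen`, and union into `seen`,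
--     # counting each level at once -- no per-node stack or worklist.
--     # Mutates `seen` like the original (same final set; insertion order may differ).
--     seen.add(start)
--     new = {start}
--     size = 0
--     while new:
--         size += len(new)
--         nxt = set()
--         for node in new:
--             nxt.update(graph[node])
--         new = nxt.difference(seen)
--         seen.update(new)
--     return size
-- ===== Notes on version B (the rewrite author's own statement) =====
-- stated objective: alternative
-- what changed: Replaces the LIFO-stack DFS (pop one node, test each neighbor against seen inside the loop) with a semi-naive set-closure iteration: each round forms the set of all neighbors of the current level with set.update, removes already-seen nodes with one set difference, and counts the whole level at once; no stack or per-node worklist remains.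
import Mathlib
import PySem

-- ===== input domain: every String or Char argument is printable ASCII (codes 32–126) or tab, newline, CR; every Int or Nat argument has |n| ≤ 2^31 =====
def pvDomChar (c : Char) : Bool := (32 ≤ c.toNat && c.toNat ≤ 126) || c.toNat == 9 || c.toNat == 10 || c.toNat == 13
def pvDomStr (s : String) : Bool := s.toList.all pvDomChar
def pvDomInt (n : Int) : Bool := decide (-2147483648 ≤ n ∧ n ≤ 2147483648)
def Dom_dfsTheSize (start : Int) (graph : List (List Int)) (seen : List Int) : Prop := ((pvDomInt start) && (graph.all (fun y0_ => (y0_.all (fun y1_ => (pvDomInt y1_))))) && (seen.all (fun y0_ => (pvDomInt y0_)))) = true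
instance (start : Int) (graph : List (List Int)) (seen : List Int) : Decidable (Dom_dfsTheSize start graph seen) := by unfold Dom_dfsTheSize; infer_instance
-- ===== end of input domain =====

-- B replaces A's one-node-at-a-time LIFO-stack DFS by a semi-naive set-closure iteration
-- (whole-level neighbor set, one set difference per round); same return value. Both
-- Pythons mutate `seen` to the same final set (insertion order may differ); the
-- equivalence proved here is about the return value.

-- graph[node] (Python indexing, negative from the end); the `.getD []` default only
-- fires outside Pre_dfsTheSize (where the Python raises IndexError).
def pvNbrs (graph : List (List Int)) (node : Int) : List Int :=
  (PySem.List.pyGet? graph node).getD []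

-- ===== PORT A =====
-- A's while-loop; the stack is kept top-first (Python appends and pops at the END;
-- here push = cons and pop = head, the same LIFO discipline). Fuel only makes the
-- loop total; it is proved below (pvLoopA_count) never to run out.
def pvLoopA (graph : List (List Int)) : Nat → List Int → List Int → Int → Int
  | 0, _, _, size => size
  | _ + 1, [], _, size => size
  | f + 1, node :: stack, seen, size =>
    let p := (pvNbrs graph node).foldl
      (fun st nb => if nb ∈ st.2 then st else (nb :: st.1, PySem.Set.add st.2 nb))
      (stack, seen)
    pvLoopA graph f p.1 p.2 (size + 1)

def dfsTheSize (start : Int) (graph : List (List Int)) (seen : List Int) : Int :=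
  pvLoopA graph ((graph.flatMap id).length + 1) [start] (PySem.Set.add seen start) 0

-- ===== PORT B =====
-- One round of Source B's while body: nxt = all neighbors of the level (set.update),
-- new = nxt - seen (set difference), seen |= new.
def pvRound (graph : List (List Int)) (lvl seen : List Int) : List Int × List Int :=
  let nxt : PySem.Set Int :=
    lvl.foldl (fun acc node => PySem.Set.update acc (pvNbrs graph node)) PySem.Set.empty
  let fresh := PySem.Set.diff nxt seen
  (fresh, PySem.Set.update seen fresh)

-- Source B's while-loop (fuel only for totality; pvLoopB_count shows it never runs out).
def pvLoopB (graph : List (List Int)) (f : Nat) (lvl seen : List Int) (size : Int) : Int :=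
  match f with
  | 0 => size
  | f + 1 =>
    if lvl.isEmpty then size
    else
      let p := pvRound graph lvl seen
      pvLoopB graph f p.1 p.2 (size + PySem.Set.len lvl)

def dfsTheSize_alt (start : Int) (graph : List (List Int)) (seen : List Int) : Int :=
  pvLoopB graph ((graph.flatMap id).length + 1)
    (PySem.Set.ofList [start]) (PySem.Set.add seen start) 0

-- ===== PRECONDITION & SPEC =====
-- The set of nodes A ever indexes with: start, closed under taking entries of valid
-- nodes that are not already seen — computed as a bounded monotone closure of the edge
-- relation (a property of the input graph; not a run of either port's worklist loop).
def pvReached (start : Int) (graph : List (List Int)) (seen : List Int) : List Int :=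
  (List.range ((graph.flatMap id).length + 1)).foldl
    (fun S _ => PySem.Set.update S
      ((S.flatMap (fun t => (PySem.List.pyGet? graph t).getD [])).filter
        (fun v => !(PySem.Set.contains (PySem.Set.add seen start) v))))
    [start]

-- A raises IndexError exactly when some node it reaches is not a valid (possibly
-- negative) index into graph; Pre_ excludes exactly those inputs.
def Pre_dfsTheSize (start : Int) (graph : List (List Int)) (seen : List Int) : Prop :=
  ∀ x ∈ pvReached start graph seen, PySem.Raise.InRange graph.length x
instance (start : Int) (graph : List (List Int)) (seen : List Int) : Decidable (Pre_dfsTheSize start graph seen) := by unfold Pre_dfsTheSize; infer_instance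

def pvWitness_dfsTheSize : Int × List (List Int) × List Int := (0, [[1], [0]], [])

def Spec_dfsTheSize (start : Int) (graph : List (List Int)) (seen : List Int) (out : Int) : Prop := out = dfsTheSize_alt start graph seen
instance (start : Int) (graph : List (List Int)) (seen : List Int) (out : Int) : Decidable (Spec_dfsTheSize start graph seen out) := by unfold Spec_dfsTheSize; infer_instance

-- ===== CLAIM (what is proved, stated in full; the proofs are below) =====
def Claim_equal_dfsTheSize : Prop := ∀ (start : Int) (graph : List (List Int)) (seen : List Int), Dom_dfsTheSize start graph seen → Pre_dfsTheSize start graph seen → Spec_dfsTheSize start graph seen (dfsTheSize start graph seen)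

-- ===== LEMMAS AND PROOFS =====

-- Nodes a run will still count from state (seen, pending): pending itself, plus
-- neighbors of already-reached nodes that are not in seen.
inductive pvReach (graph : List (List Int)) (seen pending : List Int) : Int → Prop
  | base {x : Int} : x ∈ pending → pvReach graph seen pending x
  | step {t nb : Int} : pvReach graph seen pending t → nb ∈ pvNbrs graph t →
      nb ∉ seen → pvReach graph seen pending nb

theorem pvReach_nil {graph : List (List Int)} {seen : List Int} {x : Int}
    (h : pvReach graph seen [] x) : False := by
  induction h with
  | base h => simp at h
  | step _ _ _ ih => exact ih

-- A's inner fold over the neighbor list: the new stack is the newly-seen neighbors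
-- (reversed) on top, the new seen is seen ++ new.
theorem pvFoldA_char (nbrs : List Int) :
    ∀ (stack seen : List Int), ∃ new : List Int,
      (nbrs.foldl (fun st nb => if nb ∈ st.2 then st else (nb :: st.1, PySem.Set.add st.2 nb))
        (stack, seen)) = (new.reverse ++ stack, seen ++ new) ∧
      new.Nodup ∧ (∀ x, x ∈ new ↔ x ∈ nbrs ∧ x ∉ seen) := by
  induction nbrs with
  | nil => intro stack seen; exact ⟨[], by simp⟩
  | cons nb rest ih =>
    intro stack seen
    by_cases h : nb ∈ seen
    · obtain ⟨new, heq, hnd, hmem⟩ := ih stack seen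
      refine ⟨new, by simpa [h] using heq, hnd, fun x => ?_⟩
      rw [hmem]
      constructor
      · rintro ⟨h1, h2⟩; exact ⟨List.mem_cons_of_mem _ h1, h2⟩
      · rintro ⟨h1, h2⟩
        rcases List.mem_cons.1 h1 with rfl | h1
        · exact absurd h h2
        · exact ⟨h1, h2⟩
    · obtain ⟨new, heq, hnd, hmem⟩ := ih (nb :: stack) (seen ++ [nb])
      have hadd : PySem.Set.add seen nb = seen ++ [nb] := PySem.Set.add_of_not_mem h
      refine ⟨nb :: new, ?_, ?_, fun x => ?_⟩
      · simp only [List.foldl_cons, if_neg h, hadd, heq]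
        simp
      · refine List.nodup_cons.2 ⟨fun hc => ?_, hnd⟩
        have := (hmem nb).1 hc
        simp at this
      · constructor
        · rintro hx
          rcases List.mem_cons.1 hx with rfl | hx
          · exact ⟨List.mem_cons_self, h⟩
          · obtain ⟨h1, h2⟩ := (hmem x).1 hx
            simp at h2
            exact ⟨List.mem_cons_of_mem _ h1, h2.1⟩
        · rintro ⟨h1, h2⟩
          rcases List.mem_cons.1 h1 with rfl | h1
          · exact List.mem_cons_self
          · by_cases hxnb : x = nb
            · subst hxnb; exact List.mem_cons_self
            · exact List.mem_cons_of_mem _ ((hmem x).2 ⟨h1, by simp [h2, hxnb]⟩)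

-- B's neighbor-collection fold: membership and Nodup of the accumulated Set.
theorem pvFoldB_nxt (graph : List (List Int)) (lvl : List Int) :
    ∀ (acc : List Int), acc.Nodup →
      (lvl.foldl (fun acc node => PySem.Set.update acc (pvNbrs graph node)) acc).Nodup ∧
      (∀ x, x ∈ lvl.foldl (fun acc node => PySem.Set.update acc (pvNbrs graph node)) acc ↔
        x ∈ acc ∨ ∃ t ∈ lvl, x ∈ pvNbrs graph t) := by
  induction lvl with
  | nil => intro acc hnd; exact ⟨hnd, by simp⟩
  | cons node rest ih =>
    intro acc hnd
    obtain ⟨hnd', hmem'⟩ := ih (PySem.Set.update acc (pvNbrs graph node))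
      (PySem.Set.nodup_update _ _ hnd)
    refine ⟨hnd', fun x => ?_⟩
    simp only [List.foldl_cons, hmem', PySem.Set.mem_update, List.mem_cons]
    constructor
    · rintro ((h | h) | ⟨t, ht, h⟩)
      · exact Or.inl h
      · exact Or.inr ⟨node, Or.inl rfl, h⟩
      · exact Or.inr ⟨t, Or.inr ht, h⟩
    · rintro (h | ⟨t, (rfl | ht), h⟩)
      · exact Or.inl (Or.inl h)
      · exact Or.inl (Or.inr h)
      · exact Or.inr ⟨t, ht, h⟩

-- One round of B: the fresh level is exactly the unseen neighbors of the level.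
theorem pvRound_char (graph : List (List Int)) (lvl seen : List Int) :
    (pvRound graph lvl seen).1.Nodup ∧
    (∀ x, x ∈ (pvRound graph lvl seen).1 ↔ (∃ t ∈ lvl, x ∈ pvNbrs graph t) ∧ x ∉ seen) ∧
    (pvRound graph lvl seen).2 = PySem.Set.update seen (pvRound graph lvl seen).1 := by
  obtain ⟨hnd, hmem⟩ := pvFoldB_nxt graph lvl [] List.nodup_nil
  refine ⟨PySem.Set.nodup_diff _ _ hnd, fun x => ?_, rfl⟩
  simp only [pvRound, PySem.Set.mem_diff, hmem, List.not_mem_nil, false_or, PySem.Set.empty]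

-- Processing one node (A) rewrites the still-to-count set.
theorem pvReach_decompA (graph : List (List Int)) (seen : List Int) (node : Int)
    (rest new seen' pending' : List Int)
    (hnode : node ∈ seen)
    (hnew : ∀ x, x ∈ new ↔ x ∈ pvNbrs graph node ∧ x ∉ seen)
    (hseen' : ∀ x, x ∈ seen' ↔ x ∈ seen ∨ x ∈ new)
    (hpend' : ∀ x, x ∈ pending' ↔ x ∈ new ∨ x ∈ rest) :
    ∀ x, pvReach graph seen (node :: rest) x ↔
      x = node ∨ x ∈ new ∨ pvReach graph seen' pending' x := by
  have hmono : ∀ x, pvReach graph seen' pending' x → pvReach graph seen (node :: rest) x := by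
    intro x hx
    induction hx with
    | base h =>
      rcases (hpend' _).1 h with h | h
      · obtain ⟨h1, h2⟩ := (hnew _).1 h
        exact pvReach.step (pvReach.base List.mem_cons_self) h1 h2
      · exact pvReach.base (List.mem_cons_of_mem _ h)
    | step _ hnb hns ih =>
      exact pvReach.step ih hnb (fun hc => hns ((hseen' _).2 (Or.inl hc)))
  intro x
  constructor
  · intro hx
    induction hx with
    | base h =>
      rename_i y
      rcases List.mem_cons.1 h with rfl | h
      · exact Or.inl rfl
      · by_cases hn : y ∈ new
        · exact Or.inr (Or.inl hn)
        · exact Or.inr (Or.inr (pvReach.base ((hpend' _).2 (Or.inr h))))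
    | step ht hnb hns ih =>
      rename_i t nb
      by_cases hn : nb ∈ new
      · exact Or.inr (Or.inl hn)
      · have hnb' : nb ∉ seen' := fun hc => by
          rcases (hseen' _).1 hc with h | h
          · exact hns h
          · exact hn h
        rcases ih with rfl | hnew2 | hr
        · exact absurd ((hnew _).2 ⟨hnb, hns⟩) hn
        · exact Or.inr (Or.inr (pvReach.step (pvReach.base ((hpend' _).2 (Or.inl hnew2))) hnb hnb'))
        · exact Or.inr (Or.inr (pvReach.step hr hnb hnb'))
  · rintro (rfl | h | h)
    · exact pvReach.base List.mem_cons_self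
    · obtain ⟨h1, h2⟩ := (hnew _).1 h
      exact pvReach.step (pvReach.base List.mem_cons_self) h1 h2
    · exact hmono _ h

-- Processing a whole level (B) rewrites the still-to-count set.
theorem pvReach_decompB (graph : List (List Int)) (seen : List Int)
    (frontier new seen' pending' : List Int)
    (hnew : ∀ x, x ∈ new ↔ (∃ t ∈ frontier, x ∈ pvNbrs graph t) ∧ x ∉ seen)
    (hseen' : ∀ x, x ∈ seen' ↔ x ∈ seen ∨ x ∈ new)
    (hpend' : ∀ x, x ∈ pending' ↔ x ∈ new) :
    ∀ x, pvReach graph seen frontier x ↔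
      x ∈ frontier ∨ x ∈ new ∨ pvReach graph seen' pending' x := by
  have hmono : ∀ x, pvReach graph seen' pending' x → pvReach graph seen frontier x := by
    intro x hx
    induction hx with
    | base h =>
      obtain ⟨⟨t, ht, h1⟩, h2⟩ := (hnew _).1 ((hpend' _).1 h)
      exact pvReach.step (pvReach.base ht) h1 h2
    | step _ hnb hns ih =>
      exact pvReach.step ih hnb (fun hc => hns ((hseen' _).2 (Or.inl hc)))
  intro x
  constructor
  · intro hx
    induction hx with
    | base h => exact Or.inl h
    | step ht hnb hns ih =>
      rename_i t nb
      by_cases hn : nb ∈ new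
      · exact Or.inr (Or.inl hn)
      · have hnb' : nb ∉ seen' := fun hc => by
          rcases (hseen' _).1 hc with h | h
          · exact hns h
          · exact hn h
        rcases ih with hf | hnew2 | hr
        · exact absurd ((hnew _).2 ⟨⟨t, hf, hnb⟩, hns⟩) hn
        · exact Or.inr (Or.inr (pvReach.step (pvReach.base ((hpend' _).2 hnew2)) hnb hnb'))
        · exact Or.inr (Or.inr (pvReach.step hr hnb hnb'))
  · rintro (h | h | h)
    · exact pvReach.base h
    · obtain ⟨⟨t, ht, h1⟩, h2⟩ := (hnew _).1 h
      exact pvReach.step (pvReach.base ht) h1 h2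
    · exact hmono _ h

theorem pvFilterLen (L : List Int) (p : Int → Bool) :
    (L.filter p).length + (L.filter (fun x => !p x)).length = L.length := by
  induction L with
  | nil => simp
  | cons a t ih => by_cases h : p a <;> simp [h] <;> omega

-- Splitting the to-count list L along such a decomposition.
theorem pvSplitL (seen seen' new L : List Int) (Rold Rnew : Int → Prop)
    (hL : ∀ x, x ∈ L ↔ Rold x ∧ x ∉ seen) (hLnd : L.Nodup) (hnd : new.Nodup)
    (hdec : ∀ x, (Rold x ∧ x ∉ seen) ↔ (x ∈ new ∨ (Rnew x ∧ x ∉ seen')))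
    (hsub : ∀ x ∈ new, x ∈ seen') :
    ∃ L' : List Int, L'.Nodup ∧ (∀ x, x ∈ L' ↔ Rnew x ∧ x ∉ seen') ∧
      L.length = new.length + L'.length := by
  refine ⟨L.filter (fun x => !new.contains x), hLnd.filter _, fun x => ?_, ?_⟩
  · simp only [List.mem_filter, Bool.not_eq_eq_eq_not, Bool.not_true, List.contains_eq_mem,
      decide_eq_false_iff_not, hL, hdec]
    constructor
    · rintro ⟨h1 | h1, h2⟩
      · exact absurd h1 h2
      · exact h1
    · intro h1
      exact ⟨Or.inr h1, fun hc => h1.2 (hsub _ hc)⟩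
  · have hpart := pvFilterLen L (fun x => new.contains x)
    have hperm : (L.filter (fun x => new.contains x)).length = new.length := by
      refine List.Perm.length_eq (List.perm_ext_iff_of_nodup (hLnd.filter _) hnd |>.2 ?_)
      intro x
      simp only [List.mem_filter, List.contains_eq_mem, decide_eq_true_eq, hL]
      constructor
      · exact fun h => h.2
      · intro h
        exact ⟨(hdec x).2 (Or.inl h), h⟩
    omega

-- Main invariant for A's loop: from a state whose pending stack is duplicate-free and
-- inside seen, with L listing the still-to-count nodes, the loop adds exactly
-- pending.length + L.length (in particular the fuel never runs out).
theorem pvLoopA_count (graph : List (List Int)) :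
    ∀ (f : Nat) (pending seen : List Int) (size : Int) (L : List Int),
      pending.Nodup → (∀ x ∈ pending, x ∈ seen) →
      L.Nodup → (∀ x, x ∈ L ↔ pvReach graph seen pending x ∧ x ∉ seen) →
      pending.length + L.length ≤ f →
      pvLoopA graph f pending seen size = size + pending.length + L.length := by
  intro f
  induction f with
  | zero =>
    intro pending seen size L _ _ _ _ hf
    have h1 : pending.length = 0 := by omega
    have h2 : L.length = 0 := by omega
    simp [pvLoopA, h1, h2]
  | succ f ih =>
    intro pending seen size L hnd hps hLnd hLmem hf
    match pending with
    | [] =>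
      have hL0 : L = [] := by
        refine List.eq_nil_iff_forall_not_mem.2 (fun x hx => ?_)
        exact pvReach_nil ((hLmem x).1 hx).1
      simp [pvLoopA, hL0]
    | node :: rest =>
      obtain ⟨new, heq, hnewnd, hnewmem⟩ := pvFoldA_char (pvNbrs graph node) rest seen
      have hnode : node ∈ seen := hps node List.mem_cons_self
      have hrest : ∀ x ∈ rest, x ∈ seen := fun x hx => hps x (List.mem_cons_of_mem _ hx)
      have hseen' : ∀ x, x ∈ seen ++ new ↔ x ∈ seen ∨ x ∈ new := by simp
      have hpend' : ∀ x, x ∈ new.reverse ++ rest ↔ x ∈ new ∨ x ∈ rest := by simp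
      have hdecomp := pvReach_decompA graph seen node rest new (seen ++ new)
        (new.reverse ++ rest) hnode hnewmem hseen' hpend'
      have hdec : ∀ x, (pvReach graph seen (node :: rest) x ∧ x ∉ seen) ↔
          (x ∈ new ∨ (pvReach graph (seen ++ new) (new.reverse ++ rest) x ∧ x ∉ seen ++ new)) := by
        intro x
        constructor
        · rintro ⟨h1, h2⟩
          rcases (hdecomp x).1 h1 with rfl | h | h
          · exact absurd hnode h2
          · exact Or.inl h
          · by_cases hn : x ∈ new
            · exact Or.inl hn
            · exact Or.inr ⟨h, by simp [h2, hn]⟩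
        · rintro (h | ⟨h1, h2⟩)
          · exact ⟨(hdecomp x).2 (Or.inr (Or.inl h)), ((hnewmem x).1 h).2⟩
          · simp only [List.mem_append] at h2
            push Not at h2
            exact ⟨(hdecomp x).2 (Or.inr (Or.inr h1)), h2.1⟩
      obtain ⟨L', hL'nd, hL'mem, hlen⟩ := pvSplitL seen (seen ++ new) new L _ _
        hLmem hLnd hnewnd hdec (fun x hx => by simp [hx])
      have hpnd : (new.reverse ++ rest).Nodup := by
        refine List.Nodup.append (List.nodup_reverse.2 hnewnd) (hnd.of_cons) (fun x hx1 hx2 => ?_)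
        exact ((hnewmem x).1 (List.mem_reverse.1 hx1)).2 (hrest x hx2)
      have hps' : ∀ x ∈ new.reverse ++ rest, x ∈ seen ++ new := by
        intro x hx
        rcases (hpend' x).1 hx with h | h
        · simp [h]
        · simp [hrest x h]
      have hcall := ih (new.reverse ++ rest) (seen ++ new) (size + 1) L' hpnd hps' hL'nd
        (fun x => hL'mem x) (by simp at hf ⊢; omega)
      show pvLoopA graph (f + 1) (node :: rest) seen size = _
      simp only [pvLoopA, heq]
      rw [hcall]
      simp
      omega

-- Main invariant for B's loop: same still-to-count list, counted level by level.
theorem pvLoopB_count (graph : List (List Int)) :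
    ∀ (f : Nat) (pending seen : List Int) (size : Int) (L : List Int),
      pending.Nodup → (∀ x ∈ pending, x ∈ seen) →
      L.Nodup → (∀ x, x ∈ L ↔ pvReach graph seen pending x ∧ x ∉ seen) →
      pending.length + L.length ≤ f →
      pvLoopB graph f pending seen size = size + pending.length + L.length := by
  intro f
  induction f with
  | zero =>
    intro pending seen size L _ _ _ _ hf
    have h1 : pending.length = 0 := by omega
    have h2 : L.length = 0 := by omega
    simp [pvLoopB, h1, h2]
  | succ f ih =>
    intro pending seen size L hnd hps hLnd hLmem hf
    match pending with
    | [] =>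
      have hL0 : L = [] := by
        refine List.eq_nil_iff_forall_not_mem.2 (fun x hx => ?_)
        exact pvReach_nil ((hLmem x).1 hx).1
      simp [pvLoopB, hL0]
    | node :: rest =>
      obtain ⟨hnewnd, hnewmem, hseq⟩ := pvRound_char graph (node :: rest) seen
      set new := (pvRound graph (node :: rest) seen).1 with hnewdef
      have hseen' : ∀ x, x ∈ PySem.Set.update seen new ↔ x ∈ seen ∨ x ∈ new := by
        intro x; simp [PySem.Set.mem_update]
      have hdecomp := pvReach_decompB graph seen (node :: rest) new
        (PySem.Set.update seen new) new hnewmem hseen' (fun x => Iff.rfl)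
      have hdec : ∀ x, (pvReach graph seen (node :: rest) x ∧ x ∉ seen) ↔
          (x ∈ new ∨ (pvReach graph (PySem.Set.update seen new) new x ∧
            x ∉ PySem.Set.update seen new)) := by
        intro x
        constructor
        · rintro ⟨h1, h2⟩
          rcases (hdecomp x).1 h1 with h | h | h
          · exact absurd (hps x h) h2
          · exact Or.inl h
          · by_cases hn : x ∈ new
            · exact Or.inl hn
            · exact Or.inr ⟨h, fun hc => by
                rcases (hseen' x).1 hc with hc | hc
                · exact h2 hc
                · exact hn hc⟩
        · rintro (h | ⟨h1, h2⟩)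
          · exact ⟨(hdecomp x).2 (Or.inr (Or.inl h)), ((hnewmem x).1 h).2⟩
          · exact ⟨(hdecomp x).2 (Or.inr (Or.inr h1)),
              fun hc => h2 ((hseen' x).2 (Or.inl hc))⟩
      obtain ⟨L', hL'nd, hL'mem, hlen⟩ := pvSplitL seen (PySem.Set.update seen new) new L _ _
        hLmem hLnd hnewnd hdec (fun x hx => (hseen' x).2 (Or.inr hx))
      have hps' : ∀ x ∈ new, x ∈ PySem.Set.update seen new :=
        fun x hx => (hseen' x).2 (Or.inr hx)
      have hcall := ih new (PySem.Set.update seen new) (size + PySem.Set.len (node :: rest))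
        L' hnewnd hps' hL'nd (fun x => hL'mem x) (by simp at hf ⊢; omega)
      have hstep : pvLoopB graph (f + 1) (node :: rest) seen size =
          pvLoopB graph f new (PySem.Set.update seen new)
            (size + PySem.Set.len (node :: rest)) := by
        conv_lhs => rw [pvLoopB]
        simp only [List.isEmpty_cons, if_neg (by simp : ¬(false = true)), ← hnewdef, hseq]
      rw [hstep, hcall]
      simp [PySem.Set.len]
      omega

-- Every neighbor value lies in the flattened graph (used to bound the fuel).
theorem pvNbrs_subset (graph : List (List Int)) (t x : Int)
    (hx : x ∈ pvNbrs graph t) : x ∈ graph.flatMap id := by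
  unfold pvNbrs at hx
  cases h : PySem.List.pyGet? graph t with
  | none => rw [h] at hx; simp at hx
  | some l =>
    rw [h] at hx
    simp at hx
    exact List.mem_flatMap.2 ⟨l, PySem.List.mem_of_pyGet?_eq_some _ h, hx⟩

-- ===== VERDICT (by name: the statement is the Claim_ definition above) =====
theorem dfsTheSize_spec : Claim_equal_dfsTheSize := by
  intro start graph seen _ _
  unfold Spec_dfsTheSize dfsTheSize dfsTheSize_alt
  classical
  set seen1 := PySem.Set.add seen start with hseen1
  have hstart : start ∈ seen1 := (PySem.Set.mem_add _ _ _).2 (Or.inr rfl)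
  set P : Int → Prop := fun x => pvReach graph seen1 [start] x ∧ x ∉ seen1 with hP
  set L : List Int := (graph.flatMap id).dedup.filter (fun x => decide (P x)) with hLdef
  have hLnd : L.Nodup := (List.nodup_dedup _).filter _
  have hPsub : ∀ x, P x → x ∈ graph.flatMap id := by
    rintro x ⟨hr, hs⟩
    induction hr with
    | base h =>
      simp at h
      subst h
      exact absurd hstart hs
    | step _ hnb _ _ => exact pvNbrs_subset graph _ _ hnb
  have hLmem : ∀ x, x ∈ L ↔ pvReach graph seen1 [start] x ∧ x ∉ seen1 := by
    intro x
    simp only [hLdef, List.mem_filter, List.mem_dedup, decide_eq_true_eq]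
    constructor
    · exact fun h => h.2
    · exact fun h => ⟨hPsub x h, h⟩
  have hLlen : L.length ≤ (graph.flatMap id).length := by
    calc L.length ≤ (graph.flatMap id).dedup.length := List.length_filter_le _ _
      _ ≤ (graph.flatMap id).length := (List.dedup_sublist _).length_le
  have hfuel : ([start] : List Int).length + L.length ≤ (graph.flatMap id).length + 1 := by
    simp only [List.length_singleton]
    omega
  have hA := pvLoopA_count graph ((graph.flatMap id).length + 1) [start] seen1 0 L
    (by simp) (by intro x hx; simp at hx; subst hx; exact hstart) hLnd hLmem hfuel
  have hofl : PySem.Set.ofList [start] = [start] := by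
    simp [PySem.Set.ofList, PySem.Set.add, PySem.Set.empty]
  have hB := pvLoopB_count graph ((graph.flatMap id).length + 1) [start] seen1 0 L
    (by simp) (by intro x hx; simp at hx; subst hx; exact hstart) hLnd hLmem hfuel
  rw [hofl]
  rw [hA, hB]
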